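-- pv_equiv track=rewrite | github.com/KIST-delight-robotics/DrumRobot2 | phil_robot/pipeline/motion_resolver.py | _replace_move_sequence
-- ===== SOURCE A (Python) =====
-- def _replace_move_sequence(op_cmds, move_cmds):
--     updated_commands = []
--     inserted = False
--
--     for command in op_cmds:
--         if command.startswith("move:"):
--             if not inserted:
--                 updated_commands.extend(move_cmds)
--                 inserted = True
--             continue
--         updated_commands.append(command)
--
--     if not inserted:
--         updated_commands.extend(move_cmds)
--
--     return updated_commands
-- ===== SOURCE B (Python) =====
-- def _replace_move_sequence(op_cmds, move_cmds):
--     ops = list(op_cmds)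
--     idx = next((i for i, c in enumerate(ops) if c.startswith("move:")), None)
--     if idx is None:
--         return ops + list(move_cmds)
--     tail = [c for c in ops[idx + 1:] if not c.startswith("move:")]
--     return ops[:idx] + list(move_cmds) + tail
-- ===== Notes on version B (the rewrite author's own statement) =====
-- stated objective: alternative
-- what changed: Instead of one stateful loop with an 'inserted' flag, B locates the first 'move:' index, then concatenates the unchanged prefix, move_cmds, and the move-filtered tail (slice-and-splice decomposition).
import Mathlib
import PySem

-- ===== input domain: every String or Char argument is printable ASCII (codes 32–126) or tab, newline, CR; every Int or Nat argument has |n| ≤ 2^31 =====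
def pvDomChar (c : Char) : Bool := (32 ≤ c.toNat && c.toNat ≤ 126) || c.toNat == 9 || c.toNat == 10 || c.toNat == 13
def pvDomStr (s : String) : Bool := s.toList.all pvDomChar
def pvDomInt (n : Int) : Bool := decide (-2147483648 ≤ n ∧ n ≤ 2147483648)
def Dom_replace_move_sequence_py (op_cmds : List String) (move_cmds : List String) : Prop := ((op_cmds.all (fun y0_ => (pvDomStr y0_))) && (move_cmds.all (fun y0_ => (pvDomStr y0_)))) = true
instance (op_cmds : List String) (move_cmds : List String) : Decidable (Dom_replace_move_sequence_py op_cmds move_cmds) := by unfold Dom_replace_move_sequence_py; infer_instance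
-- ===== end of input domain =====

-- B replaces A's stateful flag-loop by a slice-and-splice decomposition around the first 'move:' index; objective: alternative.


-- ===== PORT A =====
-- A's for-loop over op_cmds with the 'inserted' flag, as structural recursion over the same state;
-- the trailing 'if not inserted: extend(move_cmds)' is the base case.
def pvALoop (cmds : List String) (move_cmds : List String) (inserted : Bool) : List String :=
  match cmds with
  | [] => if inserted then [] else move_cmds
  | c :: rest =>
    if PySem.Str.startswith c "move:" then
      if inserted then pvALoop rest move_cmds true
      else move_cmds ++ pvALoop rest move_cmds true
    else c :: pvALoop rest move_cmds inserted

def replace_move_sequence_py (op_cmds : List String) (move_cmds : List String) : List String :=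
  pvALoop op_cmds move_cmds false

-- ===== PORT B =====
-- next((i for i,c in enumerate(ops) if c.startswith("move:")), None)
def pvFirstMoveIdx (cmds : List String) : Option Nat :=
  match cmds with
  | [] => none
  | c :: rest =>
    if PySem.Str.startswith c "move:" then some 0
    else (pvFirstMoveIdx rest).map (· + 1)

def replace_move_sequence_py_alt (op_cmds : List String) (move_cmds : List String) : List String :=
  match pvFirstMoveIdx op_cmds with
  | none => op_cmds ++ move_cmds
  | some i =>
      op_cmds.take i ++ move_cmds
        ++ (op_cmds.drop (i + 1)).filter (fun c => !(PySem.Str.startswith c "move:"))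

-- ===== PRECONDITION & SPEC =====
def Spec_replace_move_sequence_py (op_cmds : List String) (move_cmds : List String) (out : List String) : Prop := out = replace_move_sequence_py_alt op_cmds move_cmds
instance (op_cmds : List String) (move_cmds : List String) (out : List String) : Decidable (Spec_replace_move_sequence_py op_cmds move_cmds out) := by unfold Spec_replace_move_sequence_py; infer_instance

-- ===== CLAIM (what is proved, stated in full; the proofs are below) =====
def Claim_equal_replace_move_sequence_py : Prop := ∀ (op_cmds : List String) (move_cmds : List String), Dom_replace_move_sequence_py op_cmds move_cmds → Spec_replace_move_sequence_py op_cmds move_cmds (replace_move_sequence_py op_cmds move_cmds)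

-- ===== LEMMAS AND PROOFS =====
-- After insertion, A's loop just filters out the remaining move commands.
theorem pvALoop_true (cmds move_cmds : List String) :
    pvALoop cmds move_cmds true = cmds.filter (fun c => !(PySem.Str.startswith c "move:")) := by
  induction cmds with
  | nil => simp [pvALoop]
  | cons c rest ih =>
    by_cases h : PySem.Chars.startswith c.toList ['m','o','v','e',':'] = true <;>
      simp [pvALoop, List.filter, PySem.Str.startswith, h, ih]

theorem pvMain (cmds move_cmds : List String) :
    pvALoop cmds move_cmds false = replace_move_sequence_py_alt cmds move_cmds := by
  induction cmds with
  | nil => simp [pvALoop, replace_move_sequence_py_alt, pvFirstMoveIdx]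
  | cons c rest ih =>
    by_cases h : PySem.Chars.startswith c.toList ['m','o','v','e',':'] = true
    · simp [pvALoop, PySem.Str.startswith, h, replace_move_sequence_py_alt, pvFirstMoveIdx,
        pvALoop_true]
    · cases hf : pvFirstMoveIdx rest with
      | none =>
        simp [pvALoop, PySem.Str.startswith, h, replace_move_sequence_py_alt, pvFirstMoveIdx,
          hf] at ih ⊢
        exact ih
      | some i =>
        simp [pvALoop, PySem.Str.startswith, h, replace_move_sequence_py_alt, pvFirstMoveIdx,
          hf] at ih ⊢
        exact ih

-- ===== VERDICT (by name: the statement is the Claim_ definition above) =====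
theorem replace_move_sequence_py_spec : Claim_equal_replace_move_sequence_py := by
  intro op mv _
  unfold Spec_replace_move_sequence_py replace_move_sequence_py
  exact pvMain op mv
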